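-- pv_equiv track=rewrite | github.com/rahulswimmer/scalar_assignments_hw | changeCharacter.py | solve
-- ===== SOURCE A (Python) =====
-- from copy import deepcopy
--
-- def solve(A,B):
--     hashmap={}
--     newHashmap={}
--     outputArr=[]
--
--     for i in A:
--         if i in hashmap:
--             hashmap[i]+=1
--         else:
--             hashmap[i]=1
--
--     newHashmap = dict(sorted(hashmap.items(), key=lambda x: x[1]))
--
--     for i in deepcopy(newHashmap):
--         if newHashmap[i]<=B:
--             B-=newHashmap[i]
--             newHashmap.pop(i)
--
--     return len(newHashmap)
-- ===== SOURCE B (Python) =====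
-- def solve(A, B):
--     counts = {}
--     for ch in A:
--         counts[ch] = counts.get(ch, 0) + 1
--     buckets = {}
--     for v in counts.values():
--         buckets[v] = buckets.get(v, 0) + 1
--     surviving = len(counts)
--     for c in range(1, max(buckets, default=0) + 1):
--         k = buckets.get(c, 0)
--         if k == 0:
--             continue
--         if B < c:
--             break
--         rem = min(k, B // c)
--         B -= rem * c
--         surviving -= rem
--     return surviving
-- ===== Notes on version B (the rewrite author's own statement) =====
-- stated objective: alternative
-- what changed: Instead of sorting the per-char counts and popping affordable chars one at a time from a copied dict, B builds a frequency-of-frequencies table and walks counts 1..max(frequency), removing whole buckets in batches via B // c; no sort, no dict copy, no dict mutation.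
import Mathlib
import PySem

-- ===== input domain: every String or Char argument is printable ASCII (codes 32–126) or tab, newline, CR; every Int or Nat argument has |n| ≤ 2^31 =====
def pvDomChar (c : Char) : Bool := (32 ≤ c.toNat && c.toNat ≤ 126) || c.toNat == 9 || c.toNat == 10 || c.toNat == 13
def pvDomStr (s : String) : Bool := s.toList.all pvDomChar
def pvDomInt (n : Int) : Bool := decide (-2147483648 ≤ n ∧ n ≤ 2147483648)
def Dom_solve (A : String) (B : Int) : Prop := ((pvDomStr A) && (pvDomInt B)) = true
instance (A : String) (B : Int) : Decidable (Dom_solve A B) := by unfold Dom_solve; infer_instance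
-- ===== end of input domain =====

-- B replaces A's sort-the-dict-then-pop greedy by a frequency-of-frequencies table walked
-- from the cheapest count upward with batched removals (no sort of the distinct chars).

-- ===== PORT A =====
def solve (A : String) (B : Int) : Int :=
  let hashmap : PySem.Dict Char Int :=
    A.toList.foldl
      (fun d i => if d.contains i then d.modify i 0 (· + 1) else d.insert i 1)
      PySem.Dict.empty
  let newHashmap : PySem.Dict Char Int :=
    PySem.Dict.ofList (PySem.List.sorted hashmap.items (fun x => x.2))
  let st :=
    newHashmap.keys.foldl
      (fun (st : PySem.Dict Char Int × Int) i =>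
        if st.1.getD i 0 ≤ st.2 then (st.1.erase i, st.2 - st.1.getD i 0) else st)
      (newHashmap, B)
  (st.1.size : Int)

-- ===== PORT B =====
-- the 'for c in range(1, max(buckets, default=0) + 1)' loop with its break/continue
def solveAltLoop (buckets : PySem.Dict Int Int) (stop : Int) (c : Int) (B surviving : Int) : Int :=
  if c < stop + 1 then
    let k := buckets.getD c 0
    if k = 0 then solveAltLoop buckets stop (c + 1) B surviving
    else if B < c then surviving
    else
      let rem := min k (PySem.Int.floordiv B c)
      solveAltLoop buckets stop (c + 1) (B - rem * c) (surviving - rem)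
  else surviving
termination_by (stop + 1 - c).toNat
decreasing_by all_goals omega

def solve_alt (A : String) (B : Int) : Int :=
  let counts : PySem.Dict Char Int :=
    A.toList.foldl (fun d ch => d.insert ch (d.getD ch 0 + 1)) PySem.Dict.empty
  let buckets : PySem.Dict Int Int :=
    counts.values.foldl (fun d v => d.insert v (d.getD v 0 + 1)) PySem.Dict.empty
  solveAltLoop buckets (PySem.List.maxD buckets.keys (fun x => x) 0) 1 B (counts.size : Int)

-- ===== PRECONDITION & SPEC =====
def Spec_solve (A : String) (B : Int) (out : Int) : Prop := out = solve_alt A B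
instance (A : String) (B : Int) (out : Int) : Decidable (Spec_solve A B out) := by unfold Spec_solve; infer_instance

-- ===== CLAIM (what is proved, stated in full; the proofs are below) =====
def Claim_equal_solve : Prop := ∀ (A : String) (B : Int), Dom_solve A B → Spec_solve A B (solve A B)

-- ===== LEMMAS AND PROOFS =====

-- entries of L surviving A's pop loop with budget b
def keepL : List (Char × Int) → Int → List (Char × Int)
  | [], _ => []
  | (k, v) :: t, b => if v ≤ b then keepL t (b - v) else (k, v) :: keepL t b
def leftB : List (Char × Int) → Int → Int
  | [], b => b
  | (_, v) :: t, b => if v ≤ b then leftB t (b - v) else leftB t b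

-- number of values greedily removed from vs (in order) with budget b
def remCnt : List Int → Int → Int
  | [], _ => 0
  | v :: t, b => if v ≤ b then 1 + remCnt t (b - v) else remCnt t b

-- A's counter items, sorted by count (shared description of both programs)
def sItems (A : String) : List (Char × Int) :=
  PySem.List.sorted (PySem.Dict.counter A.toList).items (fun x => x.2)

lemma remCnt_zero (vs : List Int) (b : Int) (h : ∀ v ∈ vs, b < v) : remCnt vs b = 0 := by
  induction vs with
  | nil => rfl
  | cons v t ih =>
    have hv : b < v := h v (by simp)
    rw [remCnt, if_neg (not_le.mpr hv)]
    exact ih (fun u hu => h u (by simp [hu]))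

lemma keepL_length (L : List (Char × Int)) (b : Int) :
    ((keepL L b).length : Int) = L.length - remCnt (L.map Prod.snd) b := by
  induction L generalizing b with
  | nil => simp [keepL, remCnt]
  | cons p t ih =>
    obtain ⟨k, v⟩ := p
    by_cases h : v ≤ b
    · simp only [keepL, remCnt, List.map_cons, if_pos h, List.length_cons]
      rw [ih]; push_cast; ring
    · simp only [keepL, remCnt, List.map_cons, if_neg h, List.length_cons]
      push_cast
      rw [ih]; ring

lemma sorted_decomp (ws : List Int) (c : Int) (hp : ws.Pairwise (· ≤ ·))
    (hlo : ∀ v ∈ ws, c ≤ v) :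
    ∃ rest, ws = List.replicate (ws.count c) c ++ rest ∧ rest.Pairwise (· ≤ ·) ∧
      ∀ v ∈ rest, c + 1 ≤ v := by
  induction ws with
  | nil => exact ⟨[], by simp⟩
  | cons v t ih =>
    rcases List.pairwise_cons.mp hp with ⟨hvle, hpt⟩
    by_cases hv : v = c
    · subst hv
      obtain ⟨rest, h1, h2, h3⟩ := ih hpt (fun u hu => le_trans (hlo v (by simp)) (hvle u hu))
      refine ⟨rest, ?_, h2, h3⟩
      rw [List.count_cons_self, List.replicate_succ]
      simpa using h1
    · have hvc : c < v := lt_of_le_of_ne (hlo v (by simp)) (Ne.symm hv)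
      have hnot : c ∉ v :: t := by
        intro hmem
        rcases List.mem_cons.mp hmem with h | h
        · exact hv h.symm
        · exact absurd (hvle c h) (by omega)
      refine ⟨v :: t, ?_, hp, ?_⟩
      · rw [List.count_eq_zero.mpr hnot]; simp
      · intro u hu
        rcases List.mem_cons.mp hu with h | h
        · omega
        · have := hvle u h; omega

lemma remCnt_rep (cnt : Nat) (c b : Int) (rest : List Int) (hc : 1 ≤ c) (hb : c ≤ b)
    (hrest : ∀ v ∈ rest, c ≤ v) :
    remCnt (List.replicate cnt c ++ rest) b
      = min (cnt : Int) (PySem.Int.floordiv b c)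
        + remCnt rest (b - min (cnt : Int) (PySem.Int.floordiv b c) * c) := by
  induction cnt generalizing b with
  | zero =>
    have h1 : (1 : Int) ≤ PySem.Int.floordiv b c :=
      (PySem.Int.le_floordiv_iff_mul_le (by omega)).mpr (by omega)
    have : min ((0 : Nat) : Int) (PySem.Int.floordiv b c) = 0 := by
      simp; omega
    rw [this]; simp
  | succ n ih =>
    rw [List.replicate_succ, List.cons_append, remCnt, if_pos (by omega)]
    by_cases h2 : c ≤ b - c
    · rw [ih (b - c) h2]
      have hq : PySem.Int.floordiv (b - c) c = PySem.Int.floordiv b c - 1 := by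
        rw [PySem.Int.floordiv_eq_ediv_of_pos (by omega), PySem.Int.floordiv_eq_ediv_of_pos (by omega)]
        have : b - c = b + (-1) * c := by ring
        rw [this, Int.add_mul_ediv_right _ _ (by omega)]; omega
      rw [hq]
      have hq1 : (1 : Int) ≤ PySem.Int.floordiv b c :=
        (PySem.Int.le_floordiv_iff_mul_le (by omega)).mpr (by omega)
      set q := PySem.Int.floordiv b c with hqdef
      have hmin : min ((n : Int)) (q - 1) = min (((n + 1 : Nat) : Int)) q - 1 := by
        push_cast; omega
      rw [hmin]; ring_nf
    · -- b < 2c: exactly one removal happens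
      have hq : PySem.Int.floordiv b c = 1 := by
        rw [PySem.Int.floordiv_eq_iff_of_pos (by omega)]
        constructor <;> omega
      have hz1 : remCnt (List.replicate n c ++ rest) (b - c) = 0 := by
        apply remCnt_zero
        intro v hv
        rcases List.mem_append.mp hv with h | h
        · have := List.eq_of_mem_replicate h; omega
        · have := hrest v h; omega
      have hz2 : remCnt rest (b - c) = 0 := by
        apply remCnt_zero
        intro v hv
        have := hrest v hv; omega
      rw [hz1, hq]
      have hmin : min (((n + 1 : Nat) : Int)) 1 = 1 := by push_cast; omega
      rw [hmin, one_mul, hz2]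

lemma loopB (bk : PySem.Dict Int Int) (n : Int) :
    ∀ (f : Nat) (c : Int) (ws : List Int) (b s : Int),
      (n + 1 - c).toNat = f → 1 ≤ c →
      ws.Pairwise (· ≤ ·) → (∀ v ∈ ws, c ≤ v ∧ v ≤ n) →
      (∀ x : Int, c ≤ x → x ≤ n → bk.getD x 0 = (ws.count x : Int)) →
      solveAltLoop bk n c b s = s - remCnt ws b := by
  intro f
  induction f with
  | zero =>
    intro c ws b s hf hc hp hbnd hcnt
    have hws : ws = [] := by
      rcases ws with _ | ⟨v, t⟩
      · rfl
      · have := hbnd v (by simp); omega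
    subst hws
    rw [solveAltLoop, if_neg (by omega)]
    simp [remCnt]
  | succ f ihf =>
    intro c ws b s hf hc hp hbnd hcnt
    have hclt : c < n + 1 := by omega
    obtain ⟨rest, hdec, hprest, hlorest⟩ :=
      sorted_decomp ws c hp (fun v hv => (hbnd v hv).1)
    have hk : bk.getD c 0 = (ws.count c : Int) := hcnt c le_rfl (by omega)
    have hrest_sub : ∀ v ∈ rest, v ∈ ws := by
      intro v hv; rw [hdec]; exact List.mem_append_right _ hv
    have hcount_rest : ∀ x : Int, c + 1 ≤ x → ws.count x = rest.count x := by
      intro x hx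
      rw [hdec, List.count_append]
      have hnm : x ∉ List.replicate (ws.count c) c := by
        intro h; have := List.eq_of_mem_replicate h; omega
      rw [List.count_eq_zero.mpr hnm]
      simp
    rw [solveAltLoop, if_pos hclt]
    simp only [hk]
    by_cases hz : (ws.count c : Int) = 0
    · rw [if_pos hz]
      have hws : ws = rest := by
        rw [hdec]
        have : ws.count c = 0 := by exact_mod_cast hz
        rw [this]; simp
      rw [ihf (c + 1) rest b s (by omega) (by omega) hprest
        (fun v hv => ⟨hlorest v hv, (hbnd v (hrest_sub v hv)).2⟩)
        (fun x hx1 hx2 => by rw [hcnt x (by omega) hx2, hcount_rest x hx1]), hws]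
    · rw [if_neg hz]
      by_cases hbc : b < c
      · rw [if_pos hbc]
        have : remCnt ws b = 0 := remCnt_zero ws b (fun v hv => by have := (hbnd v hv).1; omega)
        omega
      · rw [if_neg hbc]
        set rem := min ((ws.count c : Int)) (PySem.Int.floordiv b c) with hrem
        have hrw : remCnt ws b = rem + remCnt rest (b - rem * c) := by
          rw [hdec]
          exact remCnt_rep _ c b rest hc (by omega)
            (fun v hv => le_trans (by omega) (hlorest v hv))
        rw [ihf (c + 1) rest (b - rem * c) (s - rem) (by omega) (by omega) hprest
          (fun v hv => ⟨hlorest v hv, (hbnd v (hrest_sub v hv)).2⟩)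
          (fun x hx1 hx2 => by rw [hcnt x (by omega) hx2, hcount_rest x hx1]), hrw]
        ring

lemma loopA (L : List (Char × Int)) :
    ∀ (P : List (Char × Int)) (b : Int),
      (((P ++ L).map Prod.fst).Nodup) →
      (L.map Prod.fst).foldl
        (fun (st : PySem.Dict Char Int × Int) i =>
          if st.1.getD i 0 ≤ st.2 then (st.1.erase i, st.2 - st.1.getD i 0) else st)
        (PySem.Dict.mk (P ++ L), b)
      = (PySem.Dict.mk (P ++ keepL L b), leftB L b) := by
  induction L with
  | nil => intro P b _; simp [keepL, leftB]
  | cons p t ih =>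
    intro P b hnd
    obtain ⟨k, v⟩ := p
    have hh : ((P.map Prod.fst) ++ k :: (t.map Prod.fst)).Nodup := by simpa using hnd
    obtain ⟨h1, h2, hdisj⟩ := List.nodup_append.mp hh
    have hk_notP : k ∉ P.map Prod.fst := fun hm => hdisj k hm k (by simp) rfl
    have hk_nott : k ∉ t.map Prod.fst := (List.nodup_cons.mp h2).1
    have hmem : (k, v) ∈ (PySem.Dict.mk (P ++ (k, v) :: t)).items := by simp
    have hkeysnd : (PySem.Dict.mk (P ++ (k, v) :: t)).keys.Nodup := by
      simpa [PySem.Dict.keys] using hnd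
    have hget : (PySem.Dict.mk (P ++ (k, v) :: t)).getD k 0 = v :=
      PySem.Dict.getD_of_mem_items _ hmem hkeysnd 0
    simp only [List.map_cons, List.foldl_cons]
    by_cases hvb : v ≤ b
    · rw [if_pos (by rw [hget]; exact hvb)]
      have herase : (PySem.Dict.mk (P ++ (k, v) :: t)).erase k = PySem.Dict.mk (P ++ t) := by
        simp only [PySem.Dict.erase]
        congr 1
        rw [List.filter_append]
        congr 1
        · apply List.filter_eq_self.mpr
          intro p hp
          have hne : p.1 ≠ k := fun heq =>
            hk_notP (by simpa [← heq] using List.mem_map_of_mem (f := Prod.fst) hp)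
          simp [hne]
        · rw [List.filter_cons]
          simp only [beq_self_eq_true, Bool.not_true, Bool.false_eq_true, if_false]
          apply List.filter_eq_self.mpr
          intro p hp
          have hne : p.1 ≠ k := fun heq =>
            hk_nott (by simpa [← heq] using List.mem_map_of_mem (f := Prod.fst) hp)
          simp [hne]
      rw [hget, herase]
      have hnd' : (((P ++ t).map Prod.fst).Nodup) := by
        have : (P ++ t).Sublist (P ++ (k, v) :: t) :=
          List.Sublist.append_left (List.sublist_cons_self _ _) P
        exact hnd.sublist (this.map Prod.fst)
      rw [ih P (b - v) hnd']
      simp [keepL, leftB, if_pos hvb]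
    · rw [if_neg (by rw [hget]; exact hvb)]
      have hre : P ++ (k, v) :: t = (P ++ [(k, v)]) ++ t := by simp
      rw [hre, ih (P ++ [(k, v)]) b (by rw [← hre]; exact hnd)]
      simp [keepL, leftB, if_neg hvb]

lemma sItems_perm (A : String) :
    (sItems A).Perm ((PySem.Set.ofList A.toList).map (fun k => (k, (A.toList.count k : Int)))) := by
  unfold sItems
  rw [PySem.Dict.items_counter]
  exact PySem.List.sorted_perm _ _ false

lemma sItems_fst_nodup (A : String) : ((sItems A).map Prod.fst).Nodup := by
  have h := (sItems_perm A).map Prod.fst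
  have h2 : ((PySem.Set.ofList A.toList).map (fun k => (k, (A.toList.count k : Int)))).map Prod.fst
      = PySem.Set.ofList A.toList := by
    simp [Function.comp_def]
  rw [h2] at h
  exact h.nodup_iff.mpr (PySem.Set.nodup_ofList A.toList)

lemma hashmap_eq (A : String) :
    A.toList.foldl
      (fun d i => if d.contains i then d.modify i 0 (· + 1) else d.insert i 1)
      PySem.Dict.empty = PySem.Dict.counter A.toList := by
  refine (PySem.List.foldl_congr_mem A.toList _ (fun d i => d.modify i 0 (· + 1)) _ ?_).trans rfl
  intro d i _
  by_cases h : d.contains i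
  · rw [if_pos h]
  · rw [if_neg (by simp [h])]
    show d.insert i 1 = d.insert i (d.getD i 0 + 1)
    rw [PySem.Dict.getD_of_not_contains _ _ (by simpa using h)]
    norm_num

lemma ofList_sItems (A : String) :
    PySem.Dict.ofList (sItems A) = PySem.Dict.mk (sItems A) := by
  apply PySem.Dict.ext
  show (PySem.Dict.empty.update (sItems A)).items = sItems A
  rw [PySem.Dict.update]
  rw [PySem.Dict.items_foldl_insert_fresh (sItems A) Prod.fst Prod.snd PySem.Dict.empty
    (fun a _ => by simp) (sItems_fst_nodup A)]
  simp [PySem.Dict.empty]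

lemma solve_eq (A : String) (B : Int) :
    solve A B = ((sItems A).length : Int) - remCnt ((sItems A).map Prod.snd) B := by
  simp only [solve]
  rw [hashmap_eq]
  rw [show PySem.List.sorted (PySem.Dict.counter A.toList).items (fun x => x.2) = sItems A from rfl]
  rw [ofList_sItems]
  rw [show (PySem.Dict.mk (sItems A)).keys = (sItems A).map Prod.fst by simp [PySem.Dict.keys]]
  rw [show (PySem.Dict.mk (sItems A)) = PySem.Dict.mk ([] ++ sItems A) by simp]
  rw [loopA (sItems A) [] B (by simpa using sItems_fst_nodup A)]
  simp only [PySem.Dict.size, List.nil_append]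
  rw [keepL_length]

lemma solve_alt_eq (A : String) (B : Int) :
    solve_alt A B = ((sItems A).length : Int) - remCnt ((sItems A).map Prod.snd) B := by
  simp only [solve_alt]
  rw [PySem.Dict.foldl_insert_getD_add_one_eq_counter]
  rw [PySem.Dict.foldl_insert_getD_add_one_eq_counter]
  set chars := A.toList
  set vals := (PySem.Dict.counter chars).values with hvals
  set ws := (sItems A).map Prod.snd with hws
  have hvals_eq : vals = (PySem.Set.ofList chars).map (fun k => (chars.count k : Int)) := by
    rw [hvals]
    show ((PySem.Dict.counter chars).items.map Prod.snd) = _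
    rw [PySem.Dict.items_counter]
    simp
  have hwperm : ws.Perm vals := by
    rw [hvals_eq]
    have := (sItems_perm A).map Prod.snd
    simpa using this
  set n := PySem.List.maxD (PySem.Dict.counter vals).keys (fun x => x) 0 with hn
  have hmem_vals : ∀ v ∈ ws, 1 ≤ v ∧ v ≤ n := by
    intro v hv
    have hvv : v ∈ vals := hwperm.mem_iff.mp hv
    constructor
    · rw [hvals_eq] at hvv
      obtain ⟨k, hk, rfl⟩ := List.mem_map.mp hvv
      have : 0 < chars.count k := List.count_pos_iff.mpr (by
        simpa using (PySem.Set.mem_ofList _ _).mp hk)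
      omega
    · have hkmem : v ∈ (PySem.Dict.counter vals).keys := by
        rw [PySem.Dict.keys_counter]
        exact (PySem.Set.mem_ofList _ _).mpr hvv
      have hne : (PySem.Dict.counter vals).keys ≠ [] := by
        intro h; rw [h] at hkmem; simp at hkmem
      obtain ⟨m, hm⟩ : ∃ m, PySem.List.max? (PySem.Dict.counter vals).keys (fun x => x) = some m := by
        rcases h : PySem.List.max? (PySem.Dict.counter vals).keys (fun x => x) with _ | m
        · exact absurd ((PySem.List.max?_eq_none_iff _ _).mp h) hne
        · exact ⟨m, rfl⟩
      have : n = m := by rw [hn, PySem.List.maxD, hm]; rfl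
      rw [this]
      exact PySem.List.max?_isMax hm v hkmem
  have hpw : ws.Pairwise (· ≤ ·) := by
    have := PySem.List.sorted_pairwise (PySem.Dict.counter chars).items (fun x : Char × Int => x.2)
    exact this.map Prod.snd (fun a b h => h)
  have hcnt : ∀ x : Int, (1:Int) ≤ x → x ≤ n → (PySem.Dict.counter vals).getD x 0 = (ws.count x : Int) := by
    intro x _ _
    rw [PySem.Dict.getD_counter, hwperm.count_eq]
  have hlen : ((PySem.Dict.counter chars).size : Int) = ((sItems A).length : Int) := by
    have := (sItems_perm A).length_eq
    simp only [PySem.Dict.size, PySem.Dict.items_counter]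
    rw [show (sItems A).length = _ from this]
  rw [loopB (PySem.Dict.counter vals) n ((n + 1 - 1).toNat) 1 ws B _ rfl le_rfl hpw hmem_vals hcnt]
  rw [hlen]

-- ===== VERDICT (by name: the statement is the Claim_ definition above) =====
theorem solve_spec : Claim_equal_solve := by
  intro A B _
  show solve A B = solve_alt A B
  rw [solve_eq, solve_alt_eq]
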